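-- pv_equiv track=rewrite | github.com/ngl0108/Netsphere-Free | Netsphere_Free_Backend/app/api/license_deps.py | _feature_candidates
-- ===== SOURCE A (Python) =====
-- _FEATURE_ALIASES: dict[str, set[str]] = {
--     "policy": {"policies"},
--     "policies": {"policy"},
--     "visual": {"visual_config"},
--     "visual_config": {"visual"},
--     "automation_hub": {"automation_hub", "automation"},
-- }
--
-- def _normalize_feature(value: str | None) -> str:
--     return str(value or "").strip().lower().replace("-", "_").replace(" ", "_")
--
-- def _feature_candidates(feature: str) -> set[str]:
--     base = _normalize_feature(feature)
--     out = {base}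
--     out.update(_FEATURE_ALIASES.get(base, set()))
--     for k, aliases in _FEATURE_ALIASES.items():
--         if base in aliases:
--             out.add(k)
--     return {_normalize_feature(x) for x in out}
-- ===== SOURCE B (Python) =====
-- _FEATURE_ALIASES: dict[str, set[str]] = {
--     "policy": {"policies"},
--     "policies": {"policy"},
--     "visual": {"visual_config"},
--     "visual_config": {"visual"},
--     "automation_hub": {"automation_hub", "automation"},
-- }
--
--
-- def _normalize_feature(value: str | None) -> str:
--     return str(value or "").strip().lower().replace("-", "_").replace(" ", "_")
--
--
-- def _build_candidates() -> dict[str, set[str]]: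
--     table: dict[str, set[str]] = {}
--     for name, aliases in _FEATURE_ALIASES.items():
--         entry = table.setdefault(name, {name})
--         entry.update(aliases)
--         for a in aliases:
--             table.setdefault(a, {a}).add(name)
--     return table
--
--
-- _FEATURE_CANDIDATES: dict[str, set[str]] = _build_candidates()
--
--
-- def _feature_candidates(feature: str) -> set[str]:
--     base = _normalize_feature(feature)
--     return set(_FEATURE_CANDIDATES.get(base, {base}))
-- ===== Notes on version B (the rewrite author's own statement) =====
-- stated objective: alternative
-- what changed: B precomputes a module-level closure table mapping each known feature name to its full candidate set (forward aliases plus reverse links, built in one preprocessing pass), so the per-call work is just normalize-and-lookup instead of A's runtime dict scan and re-normalization of the result set.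
import Mathlib
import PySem

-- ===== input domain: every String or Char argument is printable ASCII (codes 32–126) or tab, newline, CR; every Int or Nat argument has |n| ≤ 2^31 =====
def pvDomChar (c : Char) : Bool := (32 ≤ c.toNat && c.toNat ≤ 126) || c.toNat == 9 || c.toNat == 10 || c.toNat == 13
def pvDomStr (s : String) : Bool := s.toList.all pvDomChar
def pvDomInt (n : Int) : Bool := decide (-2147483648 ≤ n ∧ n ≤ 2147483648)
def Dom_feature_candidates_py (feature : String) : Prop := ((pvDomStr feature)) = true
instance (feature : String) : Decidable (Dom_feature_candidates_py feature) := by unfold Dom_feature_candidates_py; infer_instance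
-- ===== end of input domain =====

-- B replaces A's runtime alias/reverse-alias scan by a precomputed symmetric candidate table and a single lookup.
-- (Python returns a set; sets are compared as finite sets, the Lean ports fix the same insertion order.)

-- ===== PORT A =====
-- the module constant _FEATURE_ALIASES (shared by both modules)
def pvFeatureAliases : PySem.Dict String (PySem.Set String) :=
  PySem.Dict.ofList
    [ ("policy", PySem.Set.ofList ["policies"]),
      ("policies", PySem.Set.ofList ["policy"]),
      ("visual", PySem.Set.ofList ["visual_config"]),
      ("visual_config", PySem.Set.ofList ["visual"]),
      ("automation_hub", PySem.Set.ofList ["automation_hub", "automation"]) ]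

-- _normalize_feature (shared helper; for a str argument, str(value or "") is value itself)
def pvNormalize (value : String) : String :=
  PySem.Str.replace (PySem.Str.replace (PySem.Str.lower (PySem.Str.strip value)) "-" "_") " " "_"

-- body of _feature_candidates after 'base = _normalize_feature(feature)'
def pvACore (base : String) : List String :=
  let out : PySem.Set String := PySem.Set.ofList [base]
  let out := PySem.Set.update out (pvFeatureAliases.getD base (PySem.Set.ofList []))
  let out := pvFeatureAliases.items.foldl
    (fun o kv => if kv.2.contains base then PySem.Set.add o kv.1 else o) out
  PySem.Set.ofList (out.map pvNormalize)

def feature_candidates_py (feature : String) : List String :=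
  pvACore (pvNormalize feature)

-- ===== PORT B =====
-- _build_candidates(): one preprocessing pass folding in forward aliases and reverse links
def pvFeatureCandidates : PySem.Dict String (PySem.Set String) :=
  pvFeatureAliases.items.foldl
    (fun table kv =>
      let table := table.modify kv.1 (PySem.Set.ofList [kv.1]) (fun e => PySem.Set.update e kv.2)
      kv.2.foldl (fun t a => t.modify a (PySem.Set.ofList [a]) (fun e => PySem.Set.add e kv.1)) table)
    PySem.Dict.empty

def feature_candidates_py_alt (feature : String) : List String :=
  let base := pvNormalize feature
  PySem.Set.ofList (pvFeatureCandidates.getD base (PySem.Set.ofList [base]))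

-- ===== PRECONDITION & SPEC =====
def Spec_feature_candidates_py (feature : String) (out : List String) : Prop := out = feature_candidates_py_alt feature
instance (feature : String) (out : List String) : Decidable (Spec_feature_candidates_py feature out) := by unfold Spec_feature_candidates_py; infer_instance

-- ===== CLAIM (what is proved, stated in full; the proofs are below) =====
def Claim_equal_feature_candidates_py : Prop := ∀ (feature : String), Dom_feature_candidates_py feature → Spec_feature_candidates_py feature (feature_candidates_py feature)

-- ===== LEMMAS AND PROOFS =====


-- single-char replace is a map
theorem pv_replace_go_single (o n : Char) (l acc : List Char) (fuel : Nat) (h : l.length ≤ fuel) :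
    PySem.Chars.replace.go [o] [n] fuel l acc
      = acc.reverse ++ l.map (fun c => if c = o then n else c) := by
  induction l generalizing fuel acc with
  | nil =>
    cases fuel <;> simp [PySem.Chars.replace.go]
  | cons c t ih =>
    cases fuel with
    | zero => simp at h
    | succ f =>
      rw [PySem.Chars.replace.go]
      by_cases hc : o = c
      · subst hc
        simp only [List.isPrefixOf, beq_self_eq_true, Bool.true_and,
          if_pos, List.length_singleton, List.drop_succ_cons, List.drop_zero]
        rw [ih _ f (by simpa using h)]
        simp
      · have hpre : ([o].isPrefixOf (c :: t)) = false := by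
          simp [List.isPrefixOf]
          exact hc
        rw [hpre]
        simp only [Bool.false_eq_true, ite_false]
        rw [ih _ f (by simpa using h)]
        simp [Ne.symm hc]

theorem pv_replace_single (cs : List Char) (o n : Char) :
    PySem.Chars.replace cs [o] [n] = cs.map (fun c => if c = o then n else c) := by
  rw [PySem.Chars.replace]
  simp only [List.isEmpty_cons, Bool.false_eq_true, ite_false]
  simpa using pv_replace_go_single o n cs [] cs.length le_rfl

-- dropWhile / strip facts
theorem pv_head_dropWhile (p : Char → Bool) (l : List Char) (c : Char)
    (hr : (l.dropWhile p).head? = some c) : p c = false := by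
  induction l with
  | nil => simp at hr
  | cons a t ih =>
    rw [List.dropWhile_cons] at hr
    by_cases h : p a = true
    · rw [if_pos h] at hr; exact ih hr
    · rw [if_neg h] at hr
      simp at hr
      rw [← hr]
      simpa using h

theorem pv_dropWhile_eq_self (p : Char → Bool) (l : List Char) (c : Char)
    (h1 : l.head? = some c) (h2 : p c = false) : l.dropWhile p = l := by
  cases l with
  | nil => rfl
  | cons a t =>
    simp at h1
    rw [List.dropWhile_cons, if_neg]
    rw [h1]; simp [h2]

theorem pv_lstrip_head (l : List Char) (c : Char)
    (h : (PySem.Chars.lstrip l).head? = some c) : PySem.Chars.isspace c = false :=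
  pv_head_dropWhile _ l c h

theorem pv_rstrip_getLast (l : List Char) (c : Char)
    (h : (PySem.Chars.rstrip l).getLast? = some c) : PySem.Chars.isspace c = false := by
  rw [PySem.Chars.rstrip, List.getLast?_reverse] at h
  exact pv_head_dropWhile _ _ c h

theorem pv_rstrip_head (l : List Char) (c : Char)
    (h : (PySem.Chars.rstrip l).head? = some c) : l.head? = some c := by
  have hsuf : (l.reverse.dropWhile PySem.Chars.isspace) <:+ l.reverse := List.dropWhile_suffix _
  have hpre : PySem.Chars.rstrip l <+: l := by
    rw [PySem.Chars.rstrip]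
    have h2 := List.reverse_prefix.mpr hsuf
    simpa using h2
  obtain ⟨t, ht⟩ := hpre
  rw [← ht]
  cases h' : PySem.Chars.rstrip l with
  | nil => rw [h'] at h; simp at h
  | cons a r =>
    rw [h'] at h
    simp at h
    simp [h]

theorem pv_strip_head (l : List Char) (c : Char)
    (h : (PySem.Chars.strip l).head? = some c) : PySem.Chars.isspace c = false := by
  rw [PySem.Chars.strip] at h
  exact pv_lstrip_head l c (pv_rstrip_head _ c h)

theorem pv_strip_getLast (l : List Char) (c : Char)
    (h : (PySem.Chars.strip l).getLast? = some c) : PySem.Chars.isspace c = false := by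
  rw [PySem.Chars.strip] at h
  exact pv_rstrip_getLast _ c h

theorem pv_strip_eq_self (l : List Char)
    (h1 : ∀ c, l.head? = some c → PySem.Chars.isspace c = false)
    (h2 : ∀ c, l.getLast? = some c → PySem.Chars.isspace c = false) :
    PySem.Chars.strip l = l := by
  rw [PySem.Chars.strip, PySem.Chars.lstrip]
  cases l with
  | nil => rfl
  | cons a t =>
    rw [pv_dropWhile_eq_self _ _ a rfl (h1 a rfl)]
    rw [PySem.Chars.rstrip]
    cases hl : (a :: t).getLast? with
    | none => simp at hl
    | some c =>
      rw [pv_dropWhile_eq_self _ _ c (by rw [List.head?_reverse]; exact hl) (h2 c hl)]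
      exact List.reverse_reverse _

-- Char arithmetic facts
theorem pv_toNat_ofNat (n : Nat) (h : n < 55296) : (Char.ofNat n).toNat = n := by
  have hv : n.isValidChar := Or.inl h
  rw [Char.ofNat, dif_pos hv]
  simp [Char.ofNatAux, Char.toNat]

theorem pv_char_le (a b : Char) : (a ≤ b) ↔ a.toNat ≤ b.toNat := by
  rw [Char.le_def, Char.toNat, Char.toNat]
  exact UInt32.le_iff_toNat_le

theorem pv_char_ne_of_toNat (a b : Char) (h : a.toNat ≠ b.toNat) : a ≠ b := by
  intro he; exact h (by rw [he])

theorem pv_isupper_toNat (c : Char) (h : PySem.Chars.isupper c = true) :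
    65 ≤ c.toNat ∧ c.toNat ≤ 90 := by
  rw [PySem.Chars.isupper] at h
  simp [pv_char_le] at h
  exact h

-- the per-char action of _normalize_feature after the strip
def pvH (c : Char) : Char :=
  (fun d => if d = ' ' then '_' else d) ((fun d => if d = '-' then '_' else d) (PySem.Chars.lowerChar c))

theorem pvH_facts (c : Char) :
    pvH c ≠ '-' ∧ pvH c ≠ ' ' ∧ PySem.Chars.isupper (pvH c) = false ∧
      (PySem.Chars.isspace c = false → PySem.Chars.isspace (pvH c) = false) := by
  by_cases hu : PySem.Chars.isupper c = true
  · obtain ⟨hb1, hb2⟩ := pv_isupper_toNat c hu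
    have hlt : c.toNat + 32 < 55296 := by omega
    have hdn : (PySem.Chars.lowerChar c).toNat = c.toNat + 32 := by
      rw [PySem.Chars.lowerChar, if_pos hu]
      exact pv_toNat_ofNat _ hlt
    have h45 : ('-').toNat = 45 := rfl
    have h32 : (' ').toNat = 32 := rfl
    have hd1 : PySem.Chars.lowerChar c ≠ '-' :=
      pv_char_ne_of_toNat _ _ (by rw [hdn, h45]; omega)
    have hd2 : PySem.Chars.lowerChar c ≠ ' ' :=
      pv_char_ne_of_toNat _ _ (by rw [hdn, h32]; omega)
    have hpv : pvH c = PySem.Chars.lowerChar c := by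
      rw [pvH]
      simp [hd1, hd2]
    rw [hpv]
    refine ⟨hd1, hd2, ?_, fun _ => ?_⟩
    · rw [PySem.Chars.isupper]
      simp [pv_char_le]
      omega
    · rw [PySem.Chars.isspace]
      simp
      omega
  · have hlc : PySem.Chars.lowerChar c = c := by
      rw [PySem.Chars.lowerChar, if_neg hu]
    by_cases hd : c = '-'
    · have hpv : pvH c = '_' := by subst hd; decide
      rw [hpv]
      exact ⟨by decide, by decide, by decide, fun _ => by decide⟩
    by_cases hs : c = ' '
    · have hpv : pvH c = '_' := by subst hs; decide
      rw [hpv]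
      exact ⟨by decide, by decide, by decide, fun _ => by decide⟩
    · have hpv : pvH c = c := by simp [pvH, hlc, hd, hs]
      rw [hpv]
      exact ⟨hd, hs, by simpa using hu, fun h => h⟩

theorem pvH_fixed (c : Char) (hup : PySem.Chars.isupper c = false)
    (hd : c ≠ '-') (hs : c ≠ ' ') : pvH c = c := by
  simp [pvH, PySem.Chars.lowerChar, hup, hd, hs]

theorem pvH_idem (c : Char) : pvH (pvH c) = pvH c := by
  obtain ⟨h1, h2, h3, _⟩ := pvH_facts c
  exact pvH_fixed _ h3 h1 h2

theorem pv_map_pvH_idem (l : List Char) : (l.map pvH).map pvH = l.map pvH := by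
  induction l with
  | nil => rfl
  | cons a t ih => simp only [List.map_cons, ih, pvH_idem]

theorem pvNormalize_toList (s : String) :
    (pvNormalize s).toList = (PySem.Chars.strip s.toList).map pvH := by
  rw [pvNormalize]
  simp only [PySem.Str.toList_replace, PySem.Str.toList_lower, PySem.Str.toList_strip]
  have hdash : "-".toList = ['-'] := rfl
  have hus : "_".toList = ['_'] := rfl
  have hsp : " ".toList = [' '] := rfl
  rw [hdash, hus, hsp, pv_replace_single, pv_replace_single, PySem.Chars.lower,
    List.map_map, List.map_map]
  rfl

theorem pvNormalize_idem (s : String) :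
    pvNormalize (pvNormalize s) = pvNormalize s := by
  have hl : (pvNormalize (pvNormalize s)).toList = (pvNormalize s).toList := by
    rw [pvNormalize_toList (pvNormalize s), pvNormalize_toList s]
    have hstrip : PySem.Chars.strip ((PySem.Chars.strip s.toList).map pvH)
        = (PySem.Chars.strip s.toList).map pvH := by
      apply pv_strip_eq_self
      · intro c hc
        rw [List.head?_map] at hc
        cases hu : (PySem.Chars.strip s.toList).head? with
        | none => rw [hu] at hc; simp at hc
        | some c0 =>
          rw [hu] at hc
          simp at hc
          rw [← hc]
          exact (pvH_facts c0).2.2.2 (pv_strip_head _ c0 hu)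
      · intro c hc
        rw [List.getLast?_map] at hc
        cases hu : (PySem.Chars.strip s.toList).getLast? with
        | none => rw [hu] at hc; simp at hc
        | some c0 =>
          rw [hu] at hc
          simp at hc
          rw [← hc]
          exact (pvH_facts c0).2.2.2 (pv_strip_getLast _ c0 hu)
    rw [hstrip]
    exact pv_map_pvH_idem _
  exact String.toList_inj.mp hl

theorem pv_core_unknown (base : String)
    (h1 : base ≠ "policy") (h2 : base ≠ "policies") (h3 : base ≠ "visual")
    (h4 : base ≠ "visual_config") (h5 : base ≠ "automation_hub") (h6 : base ≠ "automation")
    (hn : pvNormalize base = base) :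
    pvACore base = PySem.Set.ofList (pvFeatureCandidates.getD base (PySem.Set.ofList [base])) := by
  have hA : pvFeatureAliases.items = [("policy", ["policies"]), ("policies", ["policy"]),
      ("visual", ["visual_config"]), ("visual_config", ["visual"]),
      ("automation_hub", ["automation_hub", "automation"])] := by decide
  have hB : pvFeatureCandidates.items = [("policy", ["policy", "policies"]),
      ("policies", ["policies", "policy"]), ("visual", ["visual", "visual_config"]),
      ("visual_config", ["visual_config", "visual"]),
      ("automation_hub", ["automation_hub", "automation"]),
      ("automation", ["automation", "automation_hub"])] := by decide
  rw [pvACore, PySem.Dict.getD, PySem.Dict.get?, PySem.Dict.getD, PySem.Dict.get?, hA, hB]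
  simp only [List.find?, List.foldl, PySem.Set.ofList, PySem.Set.update, PySem.Set.add,
    PySem.Set.empty, PySem.Set.contains, List.contains_cons, List.contains_nil,
    (beq_eq_false_iff_ne).mpr (Ne.symm h1), (beq_eq_false_iff_ne).mpr (Ne.symm h2),
    (beq_eq_false_iff_ne).mpr (Ne.symm h3), (beq_eq_false_iff_ne).mpr (Ne.symm h4),
    (beq_eq_false_iff_ne).mpr (Ne.symm h5), (beq_eq_false_iff_ne).mpr (Ne.symm h6),
    (beq_eq_false_iff_ne).mpr h1, (beq_eq_false_iff_ne).mpr h2,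
    (beq_eq_false_iff_ne).mpr h3, (beq_eq_false_iff_ne).mpr h4,
    (beq_eq_false_iff_ne).mpr h5, (beq_eq_false_iff_ne).mpr h6]
  simp [hn]

-- ===== VERDICT (by name: the statement is the Claim_ definition above) =====
theorem feature_candidates_py_spec : Claim_equal_feature_candidates_py := by
  intro feature hdom
  show feature_candidates_py feature = feature_candidates_py_alt feature
  rw [feature_candidates_py, feature_candidates_py_alt]
  by_cases h1 : pvNormalize feature = "policy"
  · rw [h1]; decide
  by_cases h2 : pvNormalize feature = "policies"
  · rw [h2]; decide
  by_cases h3 : pvNormalize feature = "visual"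
  · rw [h3]; decide
  by_cases h4 : pvNormalize feature = "visual_config"
  · rw [h4]; decide
  by_cases h5 : pvNormalize feature = "automation_hub"
  · rw [h5]; decide
  by_cases h6 : pvNormalize feature = "automation"
  · rw [h6]; decide
  exact pv_core_unknown _ h1 h2 h3 h4 h5 h6 (pvNormalize_idem feature)
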